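-- pv_equiv track=rewrite | github.com/Prajwalkhandait109/Dailycode | last_duplicate_element_in_sorted_array.py | dupLastIndex
-- ===== SOURCE A (Python) =====
-- def dupLastIndex(arr):
--     # Complete the function
--     n = len(arr)
--     last_idx = -1
--     last_val = -1
--
--     for i in range(1,n):
--         if arr[i] == arr[i-1]:
--             last_idx = i
--             last_val = arr[i]
--     return[last_idx,last_val]
-- ===== SOURCE B (Python) =====
-- def dupLastIndex(arr):
--     # Backward scan: first adjacent duplicate from the end is the last one.
--     for i in range(len(arr) - 1, 0, -1):
--         if arr[i] == arr[i - 1]: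
--             return [i, arr[i]]
--     return [-1, -1]
-- ===== Notes on version B (the rewrite author's own statement) =====
-- stated objective: alternative
-- what changed: Replaced A's full forward pass that keeps overwriting last_idx/last_val with a backward scan that returns immediately at the first adjacent duplicate found from the end, maintaining no accumulator.
import Mathlib
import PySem

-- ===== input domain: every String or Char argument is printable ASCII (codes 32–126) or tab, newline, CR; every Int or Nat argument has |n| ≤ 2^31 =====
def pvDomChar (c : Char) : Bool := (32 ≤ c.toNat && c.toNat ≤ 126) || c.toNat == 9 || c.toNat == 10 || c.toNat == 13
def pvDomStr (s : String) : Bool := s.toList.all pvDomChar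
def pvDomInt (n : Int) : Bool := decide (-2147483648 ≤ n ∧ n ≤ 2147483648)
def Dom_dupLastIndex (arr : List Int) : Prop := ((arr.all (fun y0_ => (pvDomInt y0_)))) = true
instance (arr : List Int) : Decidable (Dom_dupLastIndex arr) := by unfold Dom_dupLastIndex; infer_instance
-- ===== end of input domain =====

-- B replaces A's accumulating forward pass by an early-exit backward scan; objective: alternative decomposition.

-- ===== PORT A =====
-- literal port of A: forward loop over range(1, n), overwriting (last_idx, last_val)
def dupLastIndex (arr : List Int) : List Int :=
  let n : Int := arr.length
  let s := (PySem.List.pyRange 1 n 1).foldl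
    (fun (s : Int × Int) i =>
      if PySem.List.pyGetD arr i 0 = PySem.List.pyGetD arr (i - 1) 0 then
        (i, PySem.List.pyGetD arr i 0)
      else s)
    (-1, -1)
  [s.1, s.2]

-- ===== PORT B =====
-- literal port of B: scan i from len(arr)-1 down to 1, return at the first adjacent duplicate
def dupAuxB (arr : List Int) : Nat → List Int
  | 0 => [-1, -1]
  | i + 1 =>
    if PySem.List.pyGetD arr ((i : Int) + 1) 0 = PySem.List.pyGetD arr (i : Int) 0 then
      [(i : Int) + 1, PySem.List.pyGetD arr ((i : Int) + 1) 0]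
    else dupAuxB arr i

def dupLastIndex_alt (arr : List Int) : List Int :=
  dupAuxB arr (arr.length - 1)

-- ===== PRECONDITION & SPEC =====
def Spec_dupLastIndex (arr : List Int) (out : List Int) : Prop := out = dupLastIndex_alt arr
instance (arr : List Int) (out : List Int) : Decidable (Spec_dupLastIndex arr out) := by unfold Spec_dupLastIndex; infer_instance

-- ===== CLAIM (what is proved, stated in full; the proofs are below) =====
def Claim_equal_dupLastIndex : Prop := ∀ (arr : List Int), Dom_dupLastIndex arr → Spec_dupLastIndex arr (dupLastIndex arr)

-- ===== LEMMAS AND PROOFS =====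

def dupFoldA (arr : List Int) (k : Nat) : Int × Int :=
  (PySem.List.pyRange 1 (k : Int) 1).foldl
    (fun (s : Int × Int) i =>
      if PySem.List.pyGetD arr i 0 = PySem.List.pyGetD arr (i - 1) 0 then
        (i, PySem.List.pyGetD arr i 0)
      else s)
    (-1, -1)

theorem dupFold_eq_aux (arr : List Int) (k : Nat) :
    [(dupFoldA arr (k + 1)).1, (dupFoldA arr (k + 1)).2] = dupAuxB arr k := by
  induction k with
  | zero =>
      simp [dupFoldA, dupAuxB, PySem.List.pyRange_one_eq_nil (by norm_num : (1:Int) ≤ 1)]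
  | succ k ih =>
      have h1 : (1 : Int) ≤ (k : Int) + 1 := by omega
      have hcast : ((k + 1 + 1 : Nat) : Int) = ((k : Int) + 1) + 1 := by push_cast; ring
      have hcast' : ((k + 1 : Nat) : Int) = (k : Int) + 1 := by push_cast; ring
      unfold dupFoldA
      rw [hcast, PySem.List.pyRange_one_succ_right h1, List.foldl_append]
      simp only [List.foldl]
      conv_rhs => rw [dupAuxB]
      by_cases h : PySem.List.pyGetD arr ((k : Int) + 1) 0 = PySem.List.pyGetD arr ((k : Int) + 1 - 1) 0
      · have h' : PySem.List.pyGetD arr ((k : Int) + 1) 0 = PySem.List.pyGetD arr (k : Int) 0 := by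
          simpa [show (k : Int) + 1 - 1 = (k : Int) by ring] using h
        rw [if_pos h, if_pos h']
      · have h' : ¬ PySem.List.pyGetD arr ((k : Int) + 1) 0 = PySem.List.pyGetD arr (k : Int) 0 := by
          simpa [show (k : Int) + 1 - 1 = (k : Int) by ring] using h
        rw [if_neg h, if_neg h']
        unfold dupFoldA at ih
        rw [hcast'] at ih
        exact ih

-- ===== VERDICT (by name: the statement is the Claim_ definition above) =====
theorem dupLastIndex_spec : Claim_equal_dupLastIndex := by
  intro arr _
  unfold Spec_dupLastIndex dupLastIndex dupLastIndex_alt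
  cases harr : arr.length with
  | zero =>
      simp [dupAuxB, PySem.List.pyRange_one_eq_nil (by norm_num : (0:Int) ≤ 1)]
  | succ k =>
      have h := dupFold_eq_aux arr k
      unfold dupFoldA at h
      rw [show ((k + 1 : Nat) : Int) = (k : Int) + 1 by push_cast; ring] at h
      simp only [Nat.succ_sub_one]
      rw [show ((k + 1 : Nat) : Int) = (k : Int) + 1 by push_cast; ring]
      exact h
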